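-- pv_equiv track=rewrite | github.com/sjyi/dgxtop | dgxtop/disk_monitor.py | _match_device_name
-- ===== SOURCE A (Python) =====
-- from typing import Dict, List, Optional, Any
--
-- def _match_device_name(
--     mount_device: str, diskstats_devices: List[str]
-- ) -> Optional[str]:
--     """Match mount device name to diskstats device name.
--
--     Args:
--         mount_device: Device name from /proc/mounts (e.g., /dev/sda1, /dev/nvme0n1p2)
--         diskstats_devices: List of device names from /proc/diskstats (e.g., sda, nvme0n1p2)
--
--     Returns:
--         Matching device name from diskstats_devices, or None if no match found
--     """
--     # Extract device name from mount path (remove /dev/ prefix)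
--     if mount_device.startswith("/dev/"):
--         base_name = mount_device[5:]  # Remove '/dev/' prefix
--     else:
--         base_name = mount_device
--
--     # Try exact match first
--     if base_name in diskstats_devices:
--         return base_name
--
--     # Try matching with partition numbers (e.g., sda1 -> sda)
--     for dev in diskstats_devices:
--         # Check if base_name starts with dev and has a number suffix
--         if base_name.startswith(dev):
--             suffix = base_name[len(dev) :]
--             if suffix.isdigit():
--                 return dev
--
--     # Try matching with common device variations
--     device_variations = [
--         base_name,  # Original
--         base_name.replace("nvme", "nvme"),  # NVMe devices
--         base_name.replace("mmcblk", "mmcblk"),  # MMC devices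
--         base_name.replace("sd", "sd"),  # SCSI devices
--         base_name.replace("hd", "hd"),  # Legacy devices
--         "nvme" + base_name[4:]
--         if base_name.startswith("nvme")
--         else base_name,  # NVMe variations
--         "mmcblk" + base_name[6:]
--         if base_name.startswith("mmcblk")
--         else base_name,  # MMC variations
--     ]
--
--     # Try each variation
--     for variation in device_variations:
--         if variation in diskstats_devices:
--             return variation
--
--     # Fallback: check if any diskstats device is a substring of mount device
--     for dev in diskstats_devices:
--         if dev in base_name or base_name in dev:
--             return dev
--
--     return None
-- ===== SOURCE B (Python) =====
-- def _match_device_name(mount_device, diskstats_devices):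
--     """Match mount device name to diskstats device name (single-pass rewrite)."""
--     base_name = mount_device[5:] if mount_device.startswith("/dev/") else mount_device
--
--     if base_name in diskstats_devices:
--         return base_name
--
--     part = sub = None
--     for dev in diskstats_devices:
--         if part is None and base_name.startswith(dev) and base_name[len(dev):].isdigit():
--             part = dev
--         if sub is None and (dev in base_name or base_name in dev):
--             sub = dev
--     return part if part is not None else sub
-- ===== Notes on version B (the rewrite author's own statement) =====
-- stated objective: simpler
-- what changed: Replaces A's three sequential loops with one pass that records the first partition-style match and the first substring match, and deletes the device_variations block, whose entries all reduce to base_name and are therefore dead after the exact-match guard.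
import Mathlib
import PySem

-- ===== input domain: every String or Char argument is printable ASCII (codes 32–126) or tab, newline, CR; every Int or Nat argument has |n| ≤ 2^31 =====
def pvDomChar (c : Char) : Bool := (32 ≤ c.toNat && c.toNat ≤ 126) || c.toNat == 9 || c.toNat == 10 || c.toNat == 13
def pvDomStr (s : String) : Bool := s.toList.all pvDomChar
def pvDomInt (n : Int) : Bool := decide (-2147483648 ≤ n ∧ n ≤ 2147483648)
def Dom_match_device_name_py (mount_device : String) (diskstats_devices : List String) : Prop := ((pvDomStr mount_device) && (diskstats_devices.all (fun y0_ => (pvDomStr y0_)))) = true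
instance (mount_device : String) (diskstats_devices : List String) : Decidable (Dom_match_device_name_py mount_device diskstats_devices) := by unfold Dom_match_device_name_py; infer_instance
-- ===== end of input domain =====

-- B replaces A's three sequential loops with one pass recording the first partition-style and the
-- first substring match, and drops A's device_variations block (dead: every variation equals base_name).

-- ===== PORT A =====
-- loop "for dev in diskstats_devices: if base.startswith(dev) and base[len(dev):].isdigit(): return dev"
def pvLoopPart (base : String) : List String → Option String
  | [] => none
  | dev :: rest =>
    if PySem.Str.startswith base dev then
      let suffix := PySem.Str.slice base (some (PySem.Str.len dev)) none
      if PySem.Str.strIsdigit suffix then some dev else pvLoopPart base rest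
    else pvLoopPart base rest

-- loop "for variation in device_variations: if variation in diskstats_devices: return variation"
def pvLoopVar (ds : List String) : List String → Option String
  | [] => none
  | v :: rest => if ds.contains v then some v else pvLoopVar ds rest

-- loop "for dev in diskstats_devices: if dev in base_name or base_name in dev: return dev"
def pvLoopSub (base : String) : List String → Option String
  | [] => none
  | dev :: rest =>
    if PySem.Str.isIn dev base || PySem.Str.isIn base dev then some dev else pvLoopSub base rest

def match_device_name_py (mount_device : String) (diskstats_devices : List String) : Option String :=
  let base := if PySem.Str.startswith mount_device "/dev/"
              then PySem.Str.slice mount_device (some 5) none else mount_device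
  if diskstats_devices.contains base then some base
  else
    match pvLoopPart base diskstats_devices with
    | some d => some d
    | none =>
      let variations : List String :=
        [ base,
          PySem.Str.replace base "nvme" "nvme",
          PySem.Str.replace base "mmcblk" "mmcblk",
          PySem.Str.replace base "sd" "sd",
          PySem.Str.replace base "hd" "hd",
          if PySem.Str.startswith base "nvme"
            then String.ofList (['n','v','m','e'] ++ PySem.Chars.slice base.toList (some 4) none)
            else base,
          if PySem.Str.startswith base "mmcblk"
            then String.ofList (['m','m','c','b','l','k'] ++ PySem.Chars.slice base.toList (some 6) none)
            else base ]
      match pvLoopVar diskstats_devices variations with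
      | some v => some v
      | none => pvLoopSub base diskstats_devices

-- ===== PORT B =====
-- single pass of Source B: acc = (part, sub), each filled at most once (first hit wins)
def pvScanB (base : String) (acc : Option String × Option String) : List String → Option String × Option String
  | [] => acc
  | dev :: rest =>
    let part := if acc.1.isNone && PySem.Str.startswith base dev
                   && PySem.Str.strIsdigit (PySem.Str.slice base (some (PySem.Str.len dev)) none)
                then some dev else acc.1
    let sub := if acc.2.isNone && (PySem.Str.isIn dev base || PySem.Str.isIn base dev)
               then some dev else acc.2
    pvScanB base (part, sub) rest

def match_device_name_py_alt (mount_device : String) (diskstats_devices : List String) : Option String :=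
  let base := if PySem.Str.startswith mount_device "/dev/"
              then PySem.Str.slice mount_device (some 5) none else mount_device
  if diskstats_devices.contains base then some base
  else
    let ps := pvScanB base (none, none) diskstats_devices
    match ps.1 with
    | some p => some p
    | none => ps.2

-- ===== PRECONDITION & SPEC =====
def Spec_match_device_name_py (mount_device : String) (diskstats_devices : List String) (out : Option String) : Prop := out = match_device_name_py_alt mount_device diskstats_devices
instance (mount_device : String) (diskstats_devices : List String) (out : Option String) : Decidable (Spec_match_device_name_py mount_device diskstats_devices out) := by unfold Spec_match_device_name_py; infer_instance

-- ===== CLAIM (what is proved, stated in full; the proofs are below) =====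
def Claim_equal_match_device_name_py : Prop := ∀ (mount_device : String) (diskstats_devices : List String), Dom_match_device_name_py mount_device diskstats_devices → Spec_match_device_name_py mount_device diskstats_devices (match_device_name_py mount_device diskstats_devices)

-- ===== LEMMAS AND PROOFS =====

-- replace.go with old = new just reproduces the scanned string
theorem pv_replace_go_self (old : List Char) :
    ∀ (fuel : Nat) (l acc : List Char),
      PySem.Chars.replace.go old old fuel l acc = acc.reverse ++ l := by
  intro fuel
  induction fuel with
  | zero => intro l acc; rfl
  | succ n ih =>
    intro l acc
    cases l with
    | nil => simp [PySem.Chars.replace.go]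
    | cons c t =>
      rw [PySem.Chars.replace.go]
      by_cases h : old.isPrefixOf (c :: t) = true
      · rw [if_pos h, ih]
        have hpre : old <+: (c :: t) := List.isPrefixOf_iff_prefix.mp h
        obtain ⟨u, hu⟩ := hpre
        simp [← hu]
      · rw [if_neg h, ih]; simp

theorem pv_replace_self (s old : String) (h : old.toList ≠ []) :
    PySem.Str.replace s old old = s := by
  simp only [PySem.Str.replace, PySem.Chars.replace]
  rw [if_neg (by simpa [List.isEmpty_iff] using h), pv_replace_go_self]
  simp

theorem pv_prefix_restore (base : String) (p : List Char) (h : PySem.Chars.startswith base.toList p = true) :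
    String.ofList (p ++ PySem.Chars.slice base.toList (some (p.length : Int)) none) = base := by
  have hpre : p <+: base.toList := (PySem.Chars.startswith_iff base.toList p).mp h
  have hs : PySem.Chars.slice base.toList (some (p.length : Int)) none = base.toList.drop p.length := by
    simp [pysem]
  rw [hs]
  obtain ⟨u, hu⟩ := hpre
  have : p ++ List.drop p.length base.toList = base.toList := by
    conv_rhs => rw [← hu]
    simp [← hu]
  rw [this]; simp

-- A's variations loop is dead once the exact-match test has failed
theorem pv_loopVar_dead (ds : List String) (base : String) (h : ds.contains base = false) :
    ∀ vs : List String, (∀ v ∈ vs, v = base) → pvLoopVar ds vs = none := by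
  intro vs
  induction vs with
  | nil => intro _; rfl
  | cons v rest ih =>
    intro hall
    have hv : v = base := hall v (by simp)
    simp only [pvLoopVar, hv, h]
    exact ih (fun x hx => hall x (by simp [hx]))

-- the single pass computes exactly (first partition hit, first substring hit)
theorem pv_scan_eq (base : String) :
    ∀ (ds : List String) (p s : Option String),
      pvScanB base (p, s) ds =
        ((match p with | some x => some x | none => pvLoopPart base ds),
         (match s with | some x => some x | none => pvLoopSub base ds)) := by
  intro ds
  induction ds with
  | nil =>
    intro p s
    cases p <;> cases s <;> simp [pvScanB, pvLoopPart, pvLoopSub]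
  | cons dev rest ih =>
    intro p s
    simp only [pvScanB]
    rw [ih]
    cases p <;> cases s <;>
      simp only [Option.isNone_none, Option.isNone_some, Bool.true_and, Bool.false_and,
        Bool.false_eq_true, if_true, if_false, pvLoopPart, pvLoopSub] <;>
      split_ifs <;> simp_all

-- ===== VERDICT (by name: the statement is the Claim_ definition above) =====
theorem match_device_name_py_spec : Claim_equal_match_device_name_py := by
  intro mount_device diskstats_devices _
  unfold Spec_match_device_name_py match_device_name_py match_device_name_py_alt
  set base := if PySem.Str.startswith mount_device "/dev/"
              then PySem.Str.slice mount_device (some 5) none else mount_device with hbase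
  by_cases hc : diskstats_devices.contains base = true
  · have hm : base ∈ diskstats_devices := by simpa using hc
    simp [hm]
  · have hc' : diskstats_devices.contains base = false := by simpa using hc
    simp only [hc', if_false, Bool.false_eq_true]
    rw [pv_scan_eq]
    have hvar : pvLoopVar diskstats_devices
        [ base,
          PySem.Str.replace base "nvme" "nvme",
          PySem.Str.replace base "mmcblk" "mmcblk",
          PySem.Str.replace base "sd" "sd",
          PySem.Str.replace base "hd" "hd",
          if PySem.Str.startswith base "nvme"
            then String.ofList (['n','v','m','e'] ++ PySem.Chars.slice base.toList (some 4) none)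
            else base,
          if PySem.Str.startswith base "mmcblk"
            then String.ofList (['m','m','c','b','l','k'] ++ PySem.Chars.slice base.toList (some 6) none)
            else base ] = none := by
      apply pv_loopVar_dead _ _ hc'
      intro v hv
      simp only [List.mem_cons, List.not_mem_nil, or_false] at hv
      rcases hv with h|h|h|h|h|h|h
      · exact h
      · rw [h]; exact pv_replace_self _ _ (by decide)
      · rw [h]; exact pv_replace_self _ _ (by decide)
      · rw [h]; exact pv_replace_self _ _ (by decide)
      · rw [h]; exact pv_replace_self _ _ (by decide)
      · rw [h]
        by_cases hs : PySem.Str.startswith base "nvme" = true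
        · rw [if_pos hs]
          exact pv_prefix_restore base ['n','v','m','e'] (by simpa [PySem.Str.startswith] using hs)
        · rw [if_neg hs]
      · rw [h]
        by_cases hs : PySem.Str.startswith base "mmcblk" = true
        · rw [if_pos hs]
          exact pv_prefix_restore base ['m','m','c','b','l','k'] (by simpa [PySem.Str.startswith] using hs)
        · rw [if_neg hs]
    cases hp : pvLoopPart base diskstats_devices with
    | some d => simp [hp]
    | none => simp only [hp]; rw [hvar]
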